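-- pv_equiv track=rewrite | github.com/bmmeijers/pysfc | src/pysfc/encode_decode/__init__.py | _chunks_key
-- ===== SOURCE A (Python) =====
-- def _chunks_key(chunks, mbits, ndims):
--     key = 0
--     nd = 2**ndims
--     for m in range(mbits):
--         chunk = 0
--         if m < len(chunks):
--             chunk = chunks[m]
--         key = key * nd + chunk
--     return key
-- ===== SOURCE B (Python) =====
-- def _chunks_key(chunks, mbits, ndims):
--     nd = 2 ** ndims
--     return sum(chunks[m] * nd ** (mbits - 1 - m)
--                for m in range(min(mbits, len(chunks))))
-- ===== Notes on version B (the rewrite author's own statement) =====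
-- stated objective: alternative
-- what changed: Replaces Horner's multiply-add accumulation over all mbits positions with a direct positional sum of chunks[m] times the explicit place value nd**(mbits-1-m), iterating only over the existing chunks since missing positions contribute 0.
-- outside the precondition, e.g. on _chunks_key([1], 1, -1): A returns 1.0, B returns 1.0
import Mathlib
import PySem

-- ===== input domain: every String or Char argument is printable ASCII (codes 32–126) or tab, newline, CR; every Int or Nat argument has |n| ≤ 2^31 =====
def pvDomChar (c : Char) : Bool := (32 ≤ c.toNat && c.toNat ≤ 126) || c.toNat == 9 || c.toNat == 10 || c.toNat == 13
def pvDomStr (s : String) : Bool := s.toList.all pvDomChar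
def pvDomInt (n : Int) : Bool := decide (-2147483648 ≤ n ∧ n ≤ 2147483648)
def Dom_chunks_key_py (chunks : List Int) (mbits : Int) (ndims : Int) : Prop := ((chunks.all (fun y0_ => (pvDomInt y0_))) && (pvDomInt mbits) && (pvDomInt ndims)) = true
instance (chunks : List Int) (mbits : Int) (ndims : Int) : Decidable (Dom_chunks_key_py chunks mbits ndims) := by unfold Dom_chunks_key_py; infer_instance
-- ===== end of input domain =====

-- B replaces A's Horner multiply-add accumulation by a direct positional sum of
-- chunks[m] * nd^(mbits-1-m) over the existing chunks only (objective: alternative).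


-- ===== PORT A =====
def chunks_key_py (chunks : List Int) (mbits : Int) (ndims : Int) : Int :=
  let nd : Int := 2 ^ ndims.toNat
  (PySem.List.pyRange 0 mbits 1).foldl (fun key m =>
    let chunk : Int := if m < (chunks.length : Int) then PySem.List.pyGetD chunks m 0 else 0
    key * nd + chunk) 0

-- ===== PORT B =====
def chunks_key_py_alt (chunks : List Int) (mbits : Int) (ndims : Int) : Int :=
  let nd : Int := 2 ^ ndims.toNat
  ((PySem.List.pyRange 0 (min mbits (chunks.length : Int)) 1).map
    (fun m => PySem.List.pyGetD chunks m 0 * nd ^ (mbits - 1 - m).toNat)).sum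

-- ===== PRECONDITION & SPEC =====
-- Pre_ excludes mbits > 0 with ndims < 0: there 2**ndims is a Python float and A returns a
-- float (not an int), e.g. A([1],1,-1) = 1.0; B returns the same float there.
def Pre_chunks_key_py (chunks : List Int) (mbits : Int) (ndims : Int) : Prop :=
  0 ≤ ndims ∨ mbits ≤ 0
instance (chunks : List Int) (mbits : Int) (ndims : Int) : Decidable (Pre_chunks_key_py chunks mbits ndims) := by unfold Pre_chunks_key_py; infer_instance
def pvWitness_chunks_key_py : List Int × Int × Int := ([3, 1, 2], 4, 2)

def Spec_chunks_key_py (chunks : List Int) (mbits : Int) (ndims : Int) (out : Int) : Prop := out = chunks_key_py_alt chunks mbits ndims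
instance (chunks : List Int) (mbits : Int) (ndims : Int) (out : Int) : Decidable (Spec_chunks_key_py chunks mbits ndims out) := by unfold Spec_chunks_key_py; infer_instance

-- ===== CLAIM (what is proved, stated in full; the proofs are below) =====
def Claim_equal_chunks_key_py : Prop := ∀ (chunks : List Int) (mbits : Int) (ndims : Int), Dom_chunks_key_py chunks mbits ndims → Pre_chunks_key_py chunks mbits ndims → Spec_chunks_key_py chunks mbits ndims (chunks_key_py chunks mbits ndims)

-- ===== LEMMAS AND PROOFS =====

-- Horner accumulation over range k equals the positional sum with weights nd^(k-1-m).
theorem horner_eq_positional (chunks : List Int) (nd : Int) (k : Nat) :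
    (PySem.List.pyRange 0 (k : Int) 1).foldl (fun key m =>
      key * nd + (if m < (chunks.length : Int) then PySem.List.pyGetD chunks m 0 else 0)) 0
    = ((PySem.List.pyRange 0 (k : Int) 1).map
        (fun m => (if m < (chunks.length : Int) then PySem.List.pyGetD chunks m 0 else 0)
                  * nd ^ ((k : Int) - 1 - m).toNat)).sum := by
  induction k with
  | zero => simp
  | succ k ih =>
    have hsplit : PySem.List.pyRange 0 ((k + 1 : Nat) : Int) 1
        = PySem.List.pyRange 0 (k : Int) 1 ++ [(k : Int)] := by
      have := PySem.List.pyRange_one_succ_right (a := 0) (b := (k : Int)) (by positivity)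
      push_cast
      simpa using this
    rw [hsplit, List.foldl_append, List.map_append, List.sum_append, ih]
    simp only [List.foldl_cons, List.foldl_nil, List.map_cons, List.map_nil, List.sum_cons,
      List.sum_nil]
    have hw : ∀ m ∈ PySem.List.pyRange 0 (k : Int) 1,
        (if m < (chunks.length : Int) then PySem.List.pyGetD chunks m 0 else 0)
          * nd ^ (((k + 1 : Nat) : Int) - 1 - m).toNat
        = nd * ((if m < (chunks.length : Int) then PySem.List.pyGetD chunks m 0 else 0)
          * nd ^ ((k : Int) - 1 - m).toNat) := by
      intro m hm
      rw [PySem.List.mem_pyRange_one] at hm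
      have hexp : (((k + 1 : Nat) : Int) - 1 - m).toNat = ((k : Int) - 1 - m).toNat + 1 := by
        omega
      rw [hexp, pow_succ]
      ring
    rw [List.map_congr_left hw, List.sum_map_mul_left]
    have hk : (((k + 1 : Nat) : Int) - 1 - (k : Int)).toNat = 0 := by omega
    rw [hk]
    ring

-- Dropping the guarded-zero terms: the positional sum over range k equals the sum over
-- range (min k len) of the unguarded terms (any weight function w).
theorem positional_trunc (chunks : List Int) (k : Int) (w : Int → Int) :
    ((PySem.List.pyRange 0 k 1).map
       (fun m => (if m < (chunks.length : Int) then PySem.List.pyGetD chunks m 0 else 0) * w m)).sum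
    = ((PySem.List.pyRange 0 (min k (chunks.length : Int)) 1).map
       (fun m => PySem.List.pyGetD chunks m 0 * w m)).sum := by
  by_cases hk : k ≤ (chunks.length : Int)
  · rw [min_eq_left hk]
    apply congrArg
    apply List.map_congr_left
    intro m hm
    rw [PySem.List.mem_pyRange_one] at hm
    rw [if_pos (by omega)]
  · push Not at hk
    rw [min_eq_right (le_of_lt hk)]
    rw [PySem.List.pyRange_one_append 0 (chunks.length : Int) k (by positivity) (le_of_lt hk)]
    rw [List.map_append, List.sum_append]
    have h2 : ((PySem.List.pyRange (chunks.length : Int) k 1).map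
        (fun m => (if m < (chunks.length : Int) then PySem.List.pyGetD chunks m 0 else 0) * w m)).sum
        = 0 := by
      apply List.sum_eq_zero
      intro x hx
      simp only [List.mem_map] at hx
      obtain ⟨m, hm, rfl⟩ := hx
      rw [PySem.List.mem_pyRange_one] at hm
      rw [if_neg (by omega)]
      ring
    rw [h2, add_zero]
    apply congrArg
    apply List.map_congr_left
    intro m hm
    rw [PySem.List.mem_pyRange_one] at hm
    rw [if_pos (by omega)]

-- ===== VERDICT (by name: the statement is the Claim_ definition above) =====
theorem chunks_key_py_spec : Claim_equal_chunks_key_py := by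
  intro chunks mbits ndims _ _
  show chunks_key_py chunks mbits ndims = chunks_key_py_alt chunks mbits ndims
  unfold chunks_key_py chunks_key_py_alt
  by_cases hm : mbits ≤ 0
  · rw [PySem.List.pyRange_one_eq_nil (by omega), PySem.List.pyRange_one_eq_nil (by omega)]
    simp
  · push Not at hm
    have hk : mbits = ((mbits.toNat : Nat) : Int) := by omega
    rw [hk, horner_eq_positional, positional_trunc]
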